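-- pv_equiv track=rewrite | github.com/ItsMaajinn/Rollit | alloslm.py | tabScore
-- ===== SOURCE A (Python) =====
-- def tabScore(grille, lenGrille, couleurs):
--     """
--     Fonction qui retourne le score de chaque joueur
--     :param grille: tab de tab avec None ou path
--     :param lenGrille: taille de la grille
--     :param couleurs: tab de path
--     :return: tab de score (int)
--     """
--     score = [0, 0, 0, 0]
--     for i in range(lenGrille):
--         for j in range(lenGrille):
--             if grille[i][j] is not None: # Si la case n'est pas vide
--                 index = couleurs.index(grille[i][j]) # On récupère l'index de la couleur
--                 score[index] += 1 # On incrémente le score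
--
--     return score
-- ===== SOURCE B (Python) =====
-- def tabScore(grille, lenGrille, couleurs):
--     # Sort-and-group: flatten the window into one sorted list of colors, then a
--     # single run-length scan adds each maximal run's length to its score slot.
--     n = max(lenGrille, 0)
--     cells = sorted(c for row in grille[:n] for c in row[:n] if c is not None)
--     score = [0, 0, 0, 0]
--     prev = None
--     run = 0
--     for c in cells:
--         if c == prev:
--             run += 1
--         else:
--             if prev is not None:
--                 score[couleurs.index(prev)] += run
--             prev = c
--             run = 1
--     if prev is not None:
--         score[couleurs.index(prev)] += run
--     return score
-- ===== Notes on version B (the rewrite author's own statement) =====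
-- stated objective: alternative
-- what changed: B replaces A's per-cell index-and-increment tally with a sort-based aggregation: it flattens the window into one sorted list of colors and a single run-length scan over the sorted list adds each maximal run's length to the slot couleurs.index gives.
import Mathlib
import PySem

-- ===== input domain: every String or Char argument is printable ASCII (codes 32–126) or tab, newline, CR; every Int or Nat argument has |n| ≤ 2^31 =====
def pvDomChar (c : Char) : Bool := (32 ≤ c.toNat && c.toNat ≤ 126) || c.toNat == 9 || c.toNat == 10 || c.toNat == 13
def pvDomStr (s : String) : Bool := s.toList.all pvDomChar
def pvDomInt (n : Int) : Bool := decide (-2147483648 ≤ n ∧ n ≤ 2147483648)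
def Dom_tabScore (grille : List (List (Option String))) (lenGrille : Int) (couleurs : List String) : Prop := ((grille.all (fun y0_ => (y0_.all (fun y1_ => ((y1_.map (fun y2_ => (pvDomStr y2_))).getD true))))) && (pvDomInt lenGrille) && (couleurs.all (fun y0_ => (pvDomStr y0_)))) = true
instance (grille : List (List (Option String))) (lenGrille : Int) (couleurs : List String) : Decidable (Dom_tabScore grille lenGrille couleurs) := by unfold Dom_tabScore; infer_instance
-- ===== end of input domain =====

-- B replaces A's per-cell index-and-increment with sort-based aggregation: flatten the window
-- into one sorted list of colors, then a single run-length scan adds each run to its slot.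

-- ===== PORT A =====
def tabScore (grille : List (List (Option String))) (lenGrille : Int) (couleurs : List String) : List Int :=
  let score : List Int := [0, 0, 0, 0]
  (PySem.List.pyRange 0 lenGrille 1).foldl (fun score i =>
    (PySem.List.pyRange 0 lenGrille 1).foldl (fun score j =>
      match PySem.List.pyGetD (PySem.List.pyGetD grille i []) j none with
      | none => score                                   -- empty cell: skip
      | some c =>                                       -- index = couleurs.index(...); score[index] += 1
        match PySem.List.index? couleurs c with
        | none => score                                 -- ValueError (excluded by Pre_)
        | some idx => score.set idx (score.getD idx 0 + 1)) score) score

-- ===== PORT B =====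
-- one scan step of the run-length loop over the sorted cells: state = (score, prev, run)
def pvStep (couleurs : List String) (st : List Int × Option String × Int) (c : String) :
    List Int × Option String × Int :=
  match st with
  | (score, prev, run) =>
    if some c = prev then (score, prev, run + 1)
    else
      let score' :=
        match prev with
        | none => score                                 -- first run: nothing to flush
        | some p =>                                     -- score[couleurs.index(prev)] += run
          match PySem.List.index? couleurs p with
          | none => score                               -- ValueError (excluded by Pre_)
          | some idx => score.set idx (score.getD idx 0 + run)
      (score', some c, 1)

-- the trailing 'if prev is not None: score[couleurs.index(prev)] += run'
def pvFinish (couleurs : List String) (st : List Int × Option String × Int) : List Int :=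
  match st with
  | (score, none, _) => score
  | (score, some p, run) =>
    match PySem.List.index? couleurs p with
    | none => score                                     -- ValueError (excluded by Pre_)
    | some idx => score.set idx (score.getD idx 0 + run)

def tabScore_alt (grille : List (List (Option String))) (lenGrille : Int) (couleurs : List String) : List Int :=
  let n : Int := max lenGrille 0
  let cells := PySem.List.sorted
    ((PySem.List.slice grille none (some n)).flatMap
      (fun row => (PySem.List.slice row none (some n)).filterMap id))
    (fun c => c) false
  pvFinish couleurs (cells.foldl (pvStep couleurs) ([0, 0, 0, 0], none, 0))

-- ===== PRECONDITION & SPEC =====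
-- Pre_ excludes exactly the raising inputs of A: an n×n window reaching past the grid or a
-- row (IndexError), and a non-None windowed cell whose color is not among the first 4 entries
-- of couleurs (ValueError from couleurs.index, or IndexError from score[index]).
def Pre_tabScore (grille : List (List (Option String))) (lenGrille : Int) (couleurs : List String) : Prop :=
  lenGrille.toNat ≤ grille.length ∧
  ∀ row ∈ grille.take lenGrille.toNat,
    lenGrille.toNat ≤ row.length ∧
    ∀ cell ∈ row.take lenGrille.toNat, ∀ c : String, cell = some c → c ∈ couleurs.take 4

instance (grille : List (List (Option String))) (lenGrille : Int) (couleurs : List String) : Decidable (Pre_tabScore grille lenGrille couleurs) := by unfold Pre_tabScore; infer_instance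

def pvWitness_tabScore : List (List (Option String)) × Int × List String :=
  ([[some "r", none], [none, some "g"]], 2, ["r", "g", "b", "y"])

def Spec_tabScore (grille : List (List (Option String))) (lenGrille : Int) (couleurs : List String) (out : List Int) : Prop := out = tabScore_alt grille lenGrille couleurs
instance (grille : List (List (Option String))) (lenGrille : Int) (couleurs : List String) (out : List Int) : Decidable (Spec_tabScore grille lenGrille couleurs out) := by unfold Spec_tabScore; infer_instance

-- ===== CLAIM (what is proved, stated in full; the proofs are below) =====
def Claim_equal_tabScore : Prop := ∀ (grille : List (List (Option String))) (lenGrille : Int) (couleurs : List String), Dom_tabScore grille lenGrille couleurs → Pre_tabScore grille lenGrille couleurs → Spec_tabScore grille lenGrille couleurs (tabScore grille lenGrille couleurs)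

-- ===== LEMMAS AND PROOFS =====

-- the cells of the n×n window, row-major, empty cells dropped
def pvCells (grille : List (List (Option String))) (n : Nat) : List String :=
  (grille.take n).flatMap (fun row => (row.take n).filterMap id)

-- add k to the score slot couleurs.index(c) points at (no-op where Python would raise)
def pvBumpK (couleurs : List String) (score : List Int) (c : String) (k : Int) : List Int :=
  match PySem.List.index? couleurs c with
  | none => score
  | some idx => score.set idx (score.getD idx 0 + k)

-- the total increment the cells contribute to slot m
def pvWeight (couleurs : List String) (m : Nat) (cs : List String) : Int :=
  (cs.map (fun c => if PySem.List.index? couleurs c = some m then (1 : Int) else 0)).sum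

-- skipping `none` in a fold over options is a fold over filterMap id
theorem pv_foldl_option {σ : Type} (g : σ → String → σ) :
    ∀ (l : List (Option String)) (init : σ),
      l.foldl (fun a cell => match cell with | none => a | some c => g a c) init
        = (l.filterMap id).foldl g init := by
  intro l
  induction l with
  | nil => intro init; rfl
  | cons x xs ih => intro init; cases x <;> simp [ih]

-- under Pre_'s shape conditions, the double range-fold over the window is a fold over pvCells
theorem pv_window_fold {σ : Type} (grille : List (List (Option String))) (lenGrille : Int)
    (g : σ → String → σ) (init : σ)
    (hlen : lenGrille.toNat ≤ grille.length)
    (hrow : ∀ row ∈ grille.take lenGrille.toNat, lenGrille.toNat ≤ row.length) :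
    (PySem.List.pyRange 0 lenGrille 1).foldl (fun a i =>
      (PySem.List.pyRange 0 lenGrille 1).foldl (fun a j =>
        match PySem.List.pyGetD (PySem.List.pyGetD grille i []) j none with
        | none => a
        | some c => g a c) a) init
    = (pvCells grille lenGrille.toNat).foldl g init := by
  by_cases hpos : 0 < lenGrille
  · set n := lenGrille.toNat with hn
    have hcast : ((n : Int)) = lenGrille := Int.toNat_of_nonneg hpos.le
    have hinner : ∀ (row : List (Option String)), n ≤ row.length → ∀ (a : σ),
        (PySem.List.pyRange 0 lenGrille 1).foldl (fun a j =>
          match PySem.List.pyGetD row j none with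
          | none => a
          | some c => g a c) a
        = ((row.take n).filterMap id).foldl g a := by
      intro row hrl a
      rw [← pv_foldl_option g]
      have hlenr : PySem.List.len (row.take n) = lenGrille := by
        simp [PySem.List.len, List.length_take, Nat.min_eq_left hrl, hcast]
      have hbase := PySem.List.foldl_pyRange_zero_pyGetD (row.take n) none
        (fun a cell => match cell with | none => a | some c => g a c) a
      rw [hlenr] at hbase
      rw [← hbase]
      apply PySem.List.foldl_congr_mem
      intro acc j hj
      obtain ⟨hj0, hjn⟩ := (PySem.List.mem_pyRange_one).mp hj
      have hjn' : j.toNat < n := by omega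
      rw [PySem.List.pyGetD_eq_getElem row none hj0 (by omega),
          PySem.List.pyGetD_eq_getElem (row.take n) none hj0
            (by simp [List.length_take]; omega),
          List.getElem_take]
    have hlengr : PySem.List.len (grille.take n) = lenGrille := by
      simp [PySem.List.len, List.length_take, Nat.min_eq_left hlen, hcast]
    have hbase := PySem.List.foldl_pyRange_zero_pyGetD (grille.take n) []
      (fun a row => (PySem.List.pyRange 0 lenGrille 1).foldl (fun a j =>
        match PySem.List.pyGetD row j none with
        | none => a
        | some c => g a c) a) init
    rw [hlengr] at hbase
    have houter :
        (PySem.List.pyRange 0 lenGrille 1).foldl (fun a i =>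
          (PySem.List.pyRange 0 lenGrille 1).foldl (fun a j =>
            match PySem.List.pyGetD (PySem.List.pyGetD grille i []) j none with
            | none => a
            | some c => g a c) a) init
        = (grille.take n).foldl (fun a row =>
            (PySem.List.pyRange 0 lenGrille 1).foldl (fun a j =>
              match PySem.List.pyGetD row j none with
              | none => a
              | some c => g a c) a) init := by
      rw [← hbase]
      apply PySem.List.foldl_congr_mem
      intro acc i hi
      obtain ⟨hi0, hin⟩ := (PySem.List.mem_pyRange_one).mp hi
      have hin' : i.toNat < n := by omega
      rw [PySem.List.pyGetD_eq_getElem grille [] hi0 (by omega),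
          PySem.List.pyGetD_eq_getElem (grille.take n) [] hi0
            (by simp [List.length_take]; omega),
          List.getElem_take]
    rw [houter]
    rw [pvCells, List.foldl_flatMap]
    apply PySem.List.foldl_congr_mem
    intro acc row hrowmem
    exact hinner row (hrow row hrowmem) acc
  · rw [PySem.List.pyRange_one_eq_nil (by omega)]
    have : lenGrille.toNat = 0 := by omega
    simp [pvCells, this]

theorem pv_length_bumpK (couleurs : List String) (s : List Int) (c : String) (k : Int) :
    (pvBumpK couleurs s c k).length = s.length := by
  unfold pvBumpK
  cases PySem.List.index? couleurs c <;> simp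

theorem pv_getD_bumpK (couleurs : List String) (s : List Int) (c : String) (k : Int)
    (m : Nat) (hm : m < s.length) :
    (pvBumpK couleurs s c k).getD m 0
      = s.getD m 0 + if PySem.List.index? couleurs c = some m then k else 0 := by
  unfold pvBumpK
  cases h : PySem.List.index? couleurs c with
  | none => simp
  | some idx =>
    by_cases hidx : idx = m
    · subst hidx
      simp [List.getD, hm]
    · simp [List.getD, List.getElem?_set_ne (by omega : idx ≠ m), hidx]

-- two bumps to the same slot add up
theorem pv_bumpK_add (couleurs : List String) (s : List Int) (c : String) (a b : Int) :
    pvBumpK couleurs (pvBumpK couleurs s c a) c b = pvBumpK couleurs s c (a + b) := by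
  unfold pvBumpK
  cases h : PySem.List.index? couleurs c with
  | none => rfl
  | some idx =>
    show (s.set idx (s.getD idx 0 + a)).set idx ((s.set idx (s.getD idx 0 + a)).getD idx 0 + b)
        = s.set idx (s.getD idx 0 + (a + b))
    by_cases hlt : idx < s.length
    · simp [List.getD, List.getElem?_set_self hlt, List.set_set]
      ring_nf
    · have hs : s.set idx (s.getD idx 0 + a) = s := List.set_eq_of_length_le (by omega)
      rw [hs, List.set_eq_of_length_le (by omega), List.set_eq_of_length_le (by omega)]

-- the run-length scan over ANY cell list, finished, equals per-cell unit bumps from the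
-- flushed starting state
theorem pv_scan_eq_bumps (couleurs : List String) :
    ∀ (cells : List String) (st : List Int × Option String × Int),
      pvFinish couleurs (cells.foldl (pvStep couleurs) st)
        = cells.foldl (fun s c => pvBumpK couleurs s c 1) (pvFinish couleurs st) := by
  intro cells
  induction cells with
  | nil => intro st; rfl
  | cons c rest ih =>
    intro st
    obtain ⟨score, prev, run⟩ := st
    rw [List.foldl_cons, List.foldl_cons, ih]
    congr 1
    simp only [pvStep]
    by_cases hp : some c = prev
    · rw [if_pos hp]
      subst hp
      show pvBumpK couleurs score c (run + 1) = pvBumpK couleurs (pvBumpK couleurs score c run) c 1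
      rw [pv_bumpK_add]
    · rw [if_neg hp]
      cases prev with
      | none => rfl
      | some p => rfl

-- a fold of unit bumps adds, to every slot m, the weight the cells assign to m
theorem pv_foldl_bump1 (couleurs : List String) :
    ∀ (cs : List String) (s : List Int),
      cs.foldl (fun s c => pvBumpK couleurs s c 1) s
        = (List.range s.length).map (fun m => s.getD m 0 + pvWeight couleurs m cs) := by
  intro cs
  induction cs with
  | nil =>
    intro s
    simp only [List.foldl_nil, pvWeight, List.map_nil, List.sum_nil, add_zero]
    apply List.ext_getElem
    · simp
    · intro i h1 h2
      simp [List.getD, List.getElem?_eq_getElem h1]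
  | cons c cs ih =>
    intro s
    rw [List.foldl_cons, ih, pv_length_bumpK]
    apply List.map_congr_left
    intro m hm
    rw [List.mem_range] at hm
    rw [pv_getD_bumpK couleurs s c 1 m hm]
    simp only [pvWeight, List.map_cons, List.sum_cons]
    ring

-- weight is invariant under permutation of the cells
theorem pv_weight_perm (couleurs : List String) (m : Nat) {cs ds : List String}
    (h : cs.Perm ds) : pvWeight couleurs m cs = pvWeight couleurs m ds := by
  unfold pvWeight
  exact (h.map _).sum_eq

-- ===== VERDICT (by name: the statement is the Claim_ definition above) =====
theorem tabScore_spec : Claim_equal_tabScore := by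
  intro grille lenGrille couleurs _ hpre
  obtain ⟨hlen, hrows⟩ := hpre
  have hrow : ∀ row ∈ grille.take lenGrille.toNat, lenGrille.toNat ≤ row.length :=
    fun row hr => (hrows row hr).1
  unfold Spec_tabScore
  have eA : tabScore grille lenGrille couleurs
      = (pvCells grille lenGrille.toNat).foldl (fun score c =>
          match PySem.List.index? couleurs c with
          | none => score
          | some idx => score.set idx (score.getD idx 0 + 1)) ([0, 0, 0, 0] : List Int) :=
    pv_window_fold grille lenGrille
      (fun (score : List Int) (c : String) =>
        match PySem.List.index? couleurs c with
        | none => score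
        | some idx => score.set idx (score.getD idx 0 + 1)) ([0, 0, 0, 0] : List Int) hlen hrow
  have eAb : tabScore grille lenGrille couleurs
      = (pvCells grille lenGrille.toNat).foldl (fun s c => pvBumpK couleurs s c 1)
          ([0, 0, 0, 0] : List Int) := by
    rw [eA]
    apply PySem.List.foldl_congr_mem
    intro acc c _
    rfl
  have hnn : (0 : Int) ≤ max lenGrille 0 := le_max_right _ _
  have htn : (max lenGrille 0).toNat = lenGrille.toNat := by omega
  have hslices : (PySem.List.slice grille none (some (max lenGrille 0))).flatMap
      (fun row => (PySem.List.slice row none (some (max lenGrille 0))).filterMap id)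
      = pvCells grille lenGrille.toNat := by
    have hf : (fun row : List (Option String) =>
        (PySem.List.slice row none (some (max lenGrille 0))).filterMap id)
        = (fun row => (row.take lenGrille.toNat).filterMap id) :=
      funext fun row => by rw [PySem.List.slice_to row hnn, htn]
    rw [PySem.List.slice_to grille hnn, htn, pvCells, hf]
  have eB : tabScore_alt grille lenGrille couleurs
      = (PySem.List.sorted (pvCells grille lenGrille.toNat) (fun c => c) false).foldl
          (fun s c => pvBumpK couleurs s c 1) ([0, 0, 0, 0] : List Int) := by
    show pvFinish couleurs (_) = _
    rw [hslices, pv_scan_eq_bumps]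
    rfl
  rw [eAb, eB, pv_foldl_bump1, pv_foldl_bump1]
  apply List.map_congr_left
  intro m _
  rw [pv_weight_perm couleurs m
    (PySem.List.sorted_perm (pvCells grille lenGrille.toNat) (fun c => c) false)]
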